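-- pv_equiv track=rewrite | github.com/Shoresh613/astro-script | astro_script.py | check_degree
-- ===== SOURCE A (Python) =====
-- ZODIAC_MODALITIES = {
--     "Cardinal": ["Aries", "Cancer", "Libra", "Capricorn"],
--     "Fixed": ["Taurus", "Leo", "Scorpio", "Aquarius"],
--     "Mutable": ["Gemini", "Virgo", "Sagittarius", "Pisces"],
-- }
--
-- def check_degree(planet_signs, degrees_within_sign):
--     degrees_within_sign = int(degrees_within_sign)
--     strength_status = {}
--     for planet, sign in planet_signs.items():
--         strength_status[planet] = ""
--
--         if degrees_within_sign == 29:
--             strength_status[planet] = " Anaretic"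
--         elif degrees_within_sign == 0:
--             strength_status[planet] = " Cusp"
--
--         # Check Critical Degrees for different modalities
--         if sign in ZODIAC_MODALITIES["Cardinal"] and degrees_within_sign in [0, 13, 16]:
--             strength_status[planet] += " Critical"
--         elif sign in ZODIAC_MODALITIES["Fixed"] and degrees_within_sign in [
--             8,
--             9,
--             21,
--             22,
--         ]:
--             strength_status[planet] += " Critical"
--         elif sign in ZODIAC_MODALITIES["Mutable"] and degrees_within_sign in [4, 17]:
--             strength_status[planet] += " Critical"
--
--     return strength_status
-- ===== SOURCE B (Python) =====
-- ZODIAC_MODALITIES = {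
--     "Cardinal": ["Aries", "Cancer", "Libra", "Capricorn"],
--     "Fixed": ["Taurus", "Leo", "Scorpio", "Aquarius"],
--     "Mutable": ["Gemini", "Virgo", "Sagittarius", "Pisces"],
-- }
--
-- CRITICAL_DEGREES = {"Cardinal": [0, 13, 16], "Fixed": [8, 9, 21, 22], "Mutable": [4, 17]}
--
-- def check_degree(planet_signs, degrees_within_sign):
--     d = int(degrees_within_sign)
--     # stage 1: every planet starts unmarked
--     status = {planet: "" for planet in planet_signs}
--     # stage 2: a degree-wide marker, written over the whole dict at once
--     if d == 29:
--         for planet in status: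
--             status[planet] = " Anaretic"
--     elif d == 0:
--         for planet in status:
--             status[planet] = " Cusp"
--     # stage 3: modality-major sweep — for the (at most one) modality whose
--     # critical degrees contain d, append " Critical" to its planets
--     for modality, signs in ZODIAC_MODALITIES.items():
--         if d in CRITICAL_DEGREES[modality]:
--             for planet, sign in planet_signs.items():
--                 if sign in signs:
--                     status[planet] += " Critical"
--     return status
-- ===== Notes on version B (the rewrite author's own statement) =====
-- stated objective: alternative
-- what changed: A decides everything inside one planet-major loop with a three-way elif modality chain per planet; B builds the dict in three staged passes — initialise all planets to "", overwrite the whole dict with the degree-wide base marker, then a modality-major sweep that appends " Critical" to the planets of the (at most one) modality whose critical degrees contain the value — inverting the loop nesting from per-planet classification to per-modality mutation.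
import Mathlib
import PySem

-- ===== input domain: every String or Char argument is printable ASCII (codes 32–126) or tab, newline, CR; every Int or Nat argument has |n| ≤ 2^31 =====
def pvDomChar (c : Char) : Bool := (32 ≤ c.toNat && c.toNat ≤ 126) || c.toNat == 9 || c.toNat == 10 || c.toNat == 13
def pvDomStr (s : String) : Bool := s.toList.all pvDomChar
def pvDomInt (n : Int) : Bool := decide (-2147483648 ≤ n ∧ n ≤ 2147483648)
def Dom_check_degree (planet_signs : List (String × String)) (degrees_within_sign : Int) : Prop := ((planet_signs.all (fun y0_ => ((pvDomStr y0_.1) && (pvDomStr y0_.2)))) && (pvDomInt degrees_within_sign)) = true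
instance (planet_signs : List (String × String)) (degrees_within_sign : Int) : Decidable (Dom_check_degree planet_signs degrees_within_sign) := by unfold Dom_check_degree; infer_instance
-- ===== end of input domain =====

-- B replaces A's per-planet elif chain by three staged passes over the dict (init, degree-wide base
-- marker, then a modality-major sweep appending " Critical"); objective: alternative decomposition,
-- same return value as A on association lists with distinct planet keys (A's argument is a dict, so
-- duplicate keys cannot arise; Pre_ states that).


-- ===== PORT A =====
def ZM_cardinal : List String := ["Aries", "Cancer", "Libra", "Capricorn"]
def ZM_fixed : List String := ["Taurus", "Leo", "Scorpio", "Aquarius"]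
def ZM_mutable : List String := ["Gemini", "Virgo", "Sagittarius", "Pisces"]

-- literal port of A's loop body; `strength_status[planet] += " Critical"` is Dict.modify
-- (the key is always present at that point, so the default is never used)
def check_degree_step (d : Int) (st : PySem.Dict String String) (pr : String × String) :
    PySem.Dict String String :=
  let planet := pr.1
  let sign := pr.2
  let st := st.insert planet ""
  let st :=
    if d == 29 then st.insert planet " Anaretic"
    else if d == 0 then st.insert planet " Cusp"
    else st
  if sign ∈ ZM_cardinal ∧ d ∈ ([0, 13, 16] : List Int) then
    st.modify planet "" (· ++ " Critical")
  else if sign ∈ ZM_fixed ∧ d ∈ ([8, 9, 21, 22] : List Int) then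
    st.modify planet "" (· ++ " Critical")
  else if sign ∈ ZM_mutable ∧ d ∈ ([4, 17] : List Int) then
    st.modify planet "" (· ++ " Critical")
  else st

def check_degree (planet_signs : List (String × String)) (degrees_within_sign : Int) :
    List (String × String) :=
  let d := degrees_within_sign  -- int(degrees_within_sign) is the identity on Int
  (planet_signs.foldl (check_degree_step d) PySem.Dict.empty).items

-- ===== PORT B =====
-- ZODIAC_MODALITIES.items() and CRITICAL_DEGREES as B uses them
def ZM_items : List (String × List String) :=
  [("Cardinal", ZM_cardinal), ("Fixed", ZM_fixed), ("Mutable", ZM_mutable)]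
def CRITICAL_DEGREES : PySem.Dict String (List Int) :=
  PySem.Dict.ofList [("Cardinal", [0, 13, 16]), ("Fixed", [8, 9, 21, 22]), ("Mutable", [4, 17])]

-- B's inner stage-3 loop: `for planet, sign in planet_signs.items(): if sign in signs: status[planet] += " Critical"`
def crit_pass (signs : List String) (planet_signs : List (String × String))
    (st : PySem.Dict String String) : PySem.Dict String String :=
  planet_signs.foldl
    (fun st pr => if pr.2 ∈ signs then st.modify pr.1 "" (· ++ " Critical") else st) st

def check_degree_alt (planet_signs : List (String × String)) (degrees_within_sign : Int) :
    List (String × String) :=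
  let d := degrees_within_sign
  -- stage 1: every planet starts unmarked
  let status := planet_signs.foldl (fun st pr => st.insert pr.1 "") PySem.Dict.empty
  -- stage 2: degree-wide marker written over the whole dict (`for planet in status: status[planet] = …`)
  let status :=
    if d == 29 then status.keys.foldl (fun st p => st.insert p " Anaretic") status
    else if d == 0 then status.keys.foldl (fun st p => st.insert p " Cusp") status
    else status
  -- stage 3: modality-major sweep (CRITICAL_DEGREES[modality] is getD; the keys always exist)
  let status := ZM_items.foldl
    (fun st m => if d ∈ CRITICAL_DEGREES.getD m.1 [] then crit_pass m.2 planet_signs st else st)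
    status
  status.items

-- ===== PRECONDITION & SPEC =====
-- Pre_ excludes association lists with duplicate planet keys: A's planet_signs argument is a Python
-- dict, so such lists represent no input A can receive.
def Pre_check_degree (planet_signs : List (String × String)) (degrees_within_sign : Int) : Prop :=
  (planet_signs.map Prod.fst).Nodup
instance (planet_signs : List (String × String)) (degrees_within_sign : Int) : Decidable (Pre_check_degree planet_signs degrees_within_sign) := by unfold Pre_check_degree; infer_instance
def pvWitness_check_degree : (List (String × String)) × Int := ([("Sun", "Aries"), ("Moon", "Leo")], 13)
def Spec_check_degree (planet_signs : List (String × String)) (degrees_within_sign : Int) (out : List (String × String)) : Prop := out = check_degree_alt planet_signs degrees_within_sign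
instance (planet_signs : List (String × String)) (degrees_within_sign : Int) (out : List (String × String)) : Decidable (Spec_check_degree planet_signs degrees_within_sign out) := by unfold Spec_check_degree; infer_instance

-- ===== CLAIM =====
def Claim_equal_check_degree : Prop := ∀ (planet_signs : List (String × String)) (degrees_within_sign : Int), Dom_check_degree planet_signs degrees_within_sign → Pre_check_degree planet_signs degrees_within_sign → Spec_check_degree planet_signs degrees_within_sign (check_degree planet_signs degrees_within_sign)

-- ===== LEMMAS AND PROOFS =====

-- the value A stores for a planet whose sign is s, as a function of s alone
def valA (d : Int) (s : String) : String :=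
  (if d == 29 then " Anaretic" else if d == 0 then " Cusp" else "") ++
  (if (s ∈ ZM_cardinal ∧ d ∈ ([0, 13, 16] : List Int)) ∨
      (s ∈ ZM_fixed ∧ d ∈ ([8, 9, 21, 22] : List Int)) ∨
      (s ∈ ZM_mutable ∧ d ∈ ([4, 17] : List Int)) then " Critical" else "")

lemma modify_insert (st : PySem.Dict String String) (k : String) (v : String)
    (f : String → String) :
    (st.insert k v).modify k "" f = st.insert k (f v) := by
  unfold PySem.Dict.modify
  rw [PySem.Dict.getD_insert_self, PySem.Dict.insert_insert_self]

lemma stepA_eq (d : Int) (st : PySem.Dict String String) (pr : String × String) :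
    check_degree_step d st pr = st.insert pr.1 (valA d pr.2) := by
  obtain ⟨p, s⟩ := pr
  simp only [check_degree_step, valA]
  have hmid : (if d == 29 then (st.insert p "").insert p " Anaretic"
      else if d == 0 then (st.insert p "").insert p " Cusp" else st.insert p "") =
      st.insert p (if d == 29 then " Anaretic" else if d == 0 then " Cusp" else "") := by
    split_ifs <;> simp [PySem.Dict.insert_insert_self]
  rw [hmid]
  by_cases h1 : s ∈ ZM_cardinal ∧ d ∈ ([0, 13, 16] : List Int)
  · rw [if_pos h1, if_pos (Or.inl h1), modify_insert]
  · by_cases h2 : s ∈ ZM_fixed ∧ d ∈ ([8, 9, 21, 22] : List Int)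
    · rw [if_neg h1, if_pos h2, if_pos (Or.inr (Or.inl h2)), modify_insert]
    · by_cases h3 : s ∈ ZM_mutable ∧ d ∈ ([4, 17] : List Int)
      · rw [if_neg h1, if_neg h2, if_pos h3, if_pos (Or.inr (Or.inr h3)), modify_insert]
      · have hOr : ¬((s ∈ ZM_cardinal ∧ d ∈ ([0, 13, 16] : List Int)) ∨
            (s ∈ ZM_fixed ∧ d ∈ ([8, 9, 21, 22] : List Int)) ∨
            (s ∈ ZM_mutable ∧ d ∈ ([4, 17] : List Int))) :=
          fun h => h.elim h1 (fun h => h.elim h2 h3)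
        rw [if_neg h1, if_neg h2, if_neg h3, if_neg hOr]
        simp

-- A's result, in closed form
lemma A_items (ps : List (String × String)) (d : Int) (h : (ps.map Prod.fst).Nodup) :
    check_degree ps d = ps.map (fun pr => (pr.1, valA d pr.2)) := by
  simp only [check_degree]
  have hstep : check_degree_step d = fun st pr => st.insert pr.1 (valA d pr.2) :=
    funext fun st => funext fun pr => stepA_eq d st pr
  rw [hstep, PySem.Dict.items_foldl_insert_fresh ps Prod.fst (fun pr => valA d pr.2)
      PySem.Dict.empty (fun _ _ => PySem.Dict.contains_empty _) h]
  rfl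

-- stage 2: a fold inserting the constant v at each key of ks
lemma const_fold_getD (ks : List String) (v : String) (st : PySem.Dict String String)
    (k : String) :
    (ks.foldl (fun st p => st.insert p v) st).getD k "" =
      if k ∈ ks then v else st.getD k "" := by
  induction ks generalizing st with
  | nil => simp
  | cons a t ih =>
    simp only [List.foldl_cons, ih, PySem.Dict.getD_insert, List.mem_cons]
    by_cases hk : k ∈ t
    · simp [hk]
    · by_cases ha : k = a <;> simp [hk, ha]

lemma const_fold_keys (ks : List String) (v : String) (st : PySem.Dict String String)
    (h : ∀ p ∈ ks, st.contains p = true) :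
    (ks.foldl (fun st p => st.insert p v) st).keys = st.keys := by
  induction ks generalizing st with
  | nil => rfl
  | cons a t ih =>
    simp only [List.foldl_cons]
    rw [ih _ (fun p hp => by
      rw [PySem.Dict.contains_insert]
      simp [h p (List.mem_cons_of_mem a hp)])]
    exact PySem.Dict.keys_insert_of_contains st v (h a (List.mem_cons_self))

-- stage 3: the sweep leaves keys it never touches alone …
lemma crit_pass_getD_not_mem (signs : List String) (ps : List (String × String))
    (st : PySem.Dict String String) (k : String) (hk : k ∉ ps.map Prod.fst) :
    (crit_pass signs ps st).getD k "" = st.getD k "" := by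
  induction ps generalizing st with
  | nil => rfl
  | cons pr t ih =>
    simp only [List.map_cons, List.mem_cons, not_or] at hk
    unfold crit_pass
    simp only [List.foldl_cons]
    rw [show (List.foldl _ _ t : PySem.Dict String String) = crit_pass signs t _ from rfl,
      ih _ hk.2]
    split_ifs with hc
    · exact PySem.Dict.getD_modify_of_ne st "" _ hk.1
    · rfl

-- … preserves the key list …
lemma crit_pass_keys (signs : List String) (ps : List (String × String))
    (st : PySem.Dict String String) (h : ∀ pr ∈ ps, st.contains pr.1 = true) :
    (crit_pass signs ps st).keys = st.keys := by
  induction ps generalizing st with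
  | nil => rfl
  | cons pr t ih =>
    unfold crit_pass
    simp only [List.foldl_cons]
    rw [show (List.foldl _ _ t : PySem.Dict String String) = crit_pass signs t _ from rfl]
    have hpr := h pr (List.mem_cons_self)
    split_ifs with hc
    · rw [ih _ (fun q hq => by
        rw [PySem.Dict.contains_modify]
        simp [h q (List.mem_cons_of_mem pr hq)])]
      rw [PySem.Dict.keys_modify]
      exact PySem.Dict.keys_insert_of_contains st _ hpr
    · exact ih _ (fun q hq => h q (List.mem_cons_of_mem pr hq))

-- … and appends " Critical" exactly to the planets whose sign is in `signs`
lemma crit_pass_getD_mem (signs : List String) (ps : List (String × String))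
    (st : PySem.Dict String String) (pr : String × String)
    (hnd : (ps.map Prod.fst).Nodup) (hpr : pr ∈ ps) :
    (crit_pass signs ps st).getD pr.1 "" =
      st.getD pr.1 "" ++ (if pr.2 ∈ signs then " Critical" else "") := by
  induction ps generalizing st with
  | nil => cases hpr
  | cons a t ih =>
    simp only [List.map_cons, List.nodup_cons] at hnd
    unfold crit_pass
    simp only [List.foldl_cons]
    rw [show (List.foldl _ _ t : PySem.Dict String String) = crit_pass signs t _ from rfl]
    rcases List.mem_cons.mp hpr with rfl | hmem
    · have hknot : pr.1 ∉ t.map Prod.fst := hnd.1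
      rw [crit_pass_getD_not_mem signs t _ pr.1 hknot]
      split_ifs with hc
      · rw [PySem.Dict.getD_modify_self]
      · simp
    · have hne : pr.1 ≠ a.1 := by
        intro he
        exact hnd.1 (he ▸ List.mem_map_of_mem hmem)
      by_cases hc : a.2 ∈ signs
      · rw [if_pos hc, ih _ hnd.2 hmem, PySem.Dict.getD_modify_of_ne st "" _ hne]
      · rw [if_neg hc]; exact ih st hnd.2 hmem

-- the items of stage 2, resp. of one stage-3 sweep over stage 2, in closed form
lemma s2_items (ps : List (String × String)) (s2 : PySem.Dict String String) (base : String)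
    (hpre : (ps.map Prod.fst).Nodup) (hkeys : s2.keys = ps.map Prod.fst)
    (hgetD : ∀ pr ∈ ps, s2.getD pr.1 "" = base) :
    s2.items = ps.map (fun pr => (pr.1, base)) := by
  rw [PySem.Dict.items_eq_map_keys s2 (by rw [hkeys]; exact hpre) "", hkeys, List.map_map]
  exact List.map_congr_left (fun pr hpr => by simp [hgetD pr hpr])

lemma stage3_items (ps : List (String × String)) (s2 : PySem.Dict String String) (base : String)
    (signs : List String)
    (hpre : (ps.map Prod.fst).Nodup) (hkeys : s2.keys = ps.map Prod.fst)
    (hgetD : ∀ pr ∈ ps, s2.getD pr.1 "" = base) :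
    (crit_pass signs ps s2).items =
      ps.map (fun pr => (pr.1, base ++ (if pr.2 ∈ signs then " Critical" else ""))) := by
  have hcont : ∀ pr ∈ ps, s2.contains pr.1 = true := fun pr hpr =>
    (PySem.Dict.contains_iff_mem_keys s2 pr.1).mpr
      (by rw [hkeys]; exact List.mem_map_of_mem hpr)
  have hk3 : (crit_pass signs ps s2).keys = ps.map Prod.fst :=
    (crit_pass_keys signs ps s2 hcont).trans hkeys
  rw [PySem.Dict.items_eq_map_keys _ (by rw [hk3]; exact hpre) "", hk3, List.map_map]
  exact List.map_congr_left (fun pr hpr => by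
    simp [crit_pass_getD_mem signs ps s2 pr hpre hpr, hgetD pr hpr])

-- ===== VERDICT =====
theorem check_degree_spec : Claim_equal_check_degree := by
  intro ps d _ hpre
  show check_degree ps d = check_degree_alt ps d
  rw [A_items ps d hpre]
  simp only [check_degree_alt]
  -- stage 1
  set s1 := ps.foldl (fun st pr => st.insert pr.1 "") PySem.Dict.empty with hs1
  have hs1items : s1.items = ps.map (fun pr => (pr.1, "")) := by
    rw [hs1, PySem.Dict.items_foldl_insert_fresh ps Prod.fst (fun _ => "")
        PySem.Dict.empty (fun _ _ => PySem.Dict.contains_empty _) hpre]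
    rfl
  have hs1keys : s1.keys = ps.map Prod.fst := by
    show s1.items.map Prod.fst = _
    rw [hs1items]; simp
  have hs1nd : s1.keys.Nodup := by rw [hs1keys]; exact hpre
  have hs1getD : ∀ pr ∈ ps, s1.getD pr.1 "" = "" := fun pr hpr =>
    PySem.Dict.getD_of_mem_items s1
      (by rw [hs1items]; exact List.mem_map_of_mem hpr) hs1nd ""
  -- stage 2
  set s2 := if d == 29 then s1.keys.foldl (fun st p => st.insert p " Anaretic") s1
    else if d == 0 then s1.keys.foldl (fun st p => st.insert p " Cusp") s1 else s1 with hs2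
  have hcont1 : ∀ p ∈ s1.keys, s1.contains p = true := fun p hp =>
    (PySem.Dict.contains_iff_mem_keys s1 p).mpr hp
  have hs2keys : s2.keys = ps.map Prod.fst := by
    rw [hs2]; split_ifs
    · rw [const_fold_keys _ _ _ hcont1]; exact hs1keys
    · rw [const_fold_keys _ _ _ hcont1]; exact hs1keys
    · exact hs1keys
  have hs2getD : ∀ pr ∈ ps, s2.getD pr.1 "" =
      (if d == 29 then " Anaretic" else if d == 0 then " Cusp" else "") := by
    intro pr hpr
    have hk : pr.1 ∈ s1.keys := by rw [hs1keys]; exact List.mem_map_of_mem hpr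
    rw [hs2]; split_ifs
    · rw [const_fold_getD, if_pos hk]
    · rw [const_fold_getD, if_pos hk]
    · exact hs1getD pr hpr
  -- stage 3: the dict lookups are literal, and the three degree lists are pairwise disjoint
  have hCg : CRITICAL_DEGREES.getD "Cardinal" [] = [0, 13, 16] := by decide
  have hFg : CRITICAL_DEGREES.getD "Fixed" [] = [8, 9, 21, 22] := by decide
  have hMg : CRITICAL_DEGREES.getD "Mutable" [] = [4, 17] := by decide
  simp only [ZM_items, List.foldl_cons, List.foldl_nil, hCg, hFg, hMg]
  by_cases hC : d ∈ ([0, 13, 16] : List Int) <;>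
    by_cases hF : d ∈ ([8, 9, 21, 22] : List Int) <;>
    by_cases hM : d ∈ ([4, 17] : List Int)
  -- four combinations with two or three degree sets hit are impossible; otherwise at most one sweep runs
  · exfalso
    simp only [List.mem_cons, List.not_mem_nil, or_false] at hC hF hM
    omega
  · exfalso
    simp only [List.mem_cons, List.not_mem_nil, or_false] at hC hF hM
    omega
  · exfalso
    simp only [List.mem_cons, List.not_mem_nil, or_false] at hC hF hM
    omega
  · simp only [hC, hF, hM, if_true, if_false]
    rw [stage3_items ps s2 _ ZM_cardinal hpre hs2keys hs2getD]
    exact List.map_congr_left (fun pr hpr => by simp [valA, hC, hF, hM])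
  · exfalso
    simp only [List.mem_cons, List.not_mem_nil, or_false] at hC hF hM
    omega
  · simp only [hC, hF, hM, if_true, if_false]
    rw [stage3_items ps s2 _ ZM_fixed hpre hs2keys hs2getD]
    exact List.map_congr_left (fun pr hpr => by simp [valA, hC, hF, hM])
  · simp only [hC, hF, hM, if_true, if_false]
    rw [stage3_items ps s2 _ ZM_mutable hpre hs2keys hs2getD]
    exact List.map_congr_left (fun pr hpr => by simp [valA, hC, hF, hM])
  · simp only [hC, hF, hM, if_false]
    rw [s2_items ps s2 _ hpre hs2keys hs2getD]
    exact List.map_congr_left (fun pr hpr => by simp [valA, hC, hF, hM])
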